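-- pv_equiv track=rewrite | github.com/yuanfeng719/KPR | script/KPR_genotyper/Script0.5_merge_and_rename_contigs.py | merge_seq
-- ===== SOURCE A (Python) =====
-- def remove_values_from_list(the_list, val):
-- 	return [value for value in the_list if value != val]
--
-- def merge_seq(seq_lst):
-- 	lst = []
-- 	for i in range(len(seq_lst)):
-- 		lst.append(seq_lst[i])
-- 	# eliminate contained and identical sequences
-- 	for i in range(len(lst)-1):
-- 		seq1 = lst[i]
-- 		for j in range(i+1,len(lst)):
-- 			seq2 = lst[j]
-- 			if seq2 in seq1:
-- 				lst[j] = ''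
-- 			elif seq1 in seq2:
-- 				lst[i] = ''
-- 	lst = remove_values_from_list(lst,'')
-- 	return lst
-- ===== SOURCE B (Python) =====
-- def merge_seq(seq_lst):
--     out = []
--     seen = set()
--     for s in seq_lst:
--         if s in seen:
--             continue
--         if any(len(t) > len(s) and s in t for t in seq_lst):
--             continue
--         seen.add(s)
--         out.append(s)
--     return out
-- ===== Notes on version B (the rewrite author's own statement) =====
-- stated objective: simpler
-- what changed: B replaces A's in-place O(n^2) pairwise elimination with a '' deletion sentinel by a single forward pass that keeps a string iff it is not already kept (seen-set) and is not a substring of a strictly longer element, with no mutation and no sentinel.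
-- intended difference: On nonempty lists whose elements are all empty strings, A returns an empty result (its deletion sentinel, the empty string, conflates genuine empty sequences with deleted slots and the final filter drops them), while B returns a one-element result holding the empty string, keeping the first duplicate as intended. — e.g. on merge_seq([""]): A returns [], B returns [""]
import Mathlib
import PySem

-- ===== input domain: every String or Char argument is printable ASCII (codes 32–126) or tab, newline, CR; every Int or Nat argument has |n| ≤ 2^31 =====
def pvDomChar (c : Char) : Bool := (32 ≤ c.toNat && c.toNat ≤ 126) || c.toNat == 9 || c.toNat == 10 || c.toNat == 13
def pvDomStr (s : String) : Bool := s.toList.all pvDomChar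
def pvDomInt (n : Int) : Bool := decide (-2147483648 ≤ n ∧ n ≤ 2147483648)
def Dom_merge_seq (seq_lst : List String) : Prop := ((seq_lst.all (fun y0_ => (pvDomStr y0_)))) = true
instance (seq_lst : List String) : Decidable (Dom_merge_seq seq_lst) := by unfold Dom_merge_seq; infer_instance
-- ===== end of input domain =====

-- B is a single forward pass with a seen-set and a direct "contained in a strictly longer
-- sequence" test, replacing A's mutating O(n^2) pairwise elimination via a '' sentinel; same
-- cost class, simpler. A mutates only its local copy (no observable argument mutation).

-- ===== PORT A =====
-- [value for value in the_list if value != val]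
def remove_values_from_list (the_list : List String) (val : String) : List String :=
  the_list.filter (fun value => value != val)

def merge_seq (seq_lst : List String) : List String :=
  -- lst = []; for i in range(len(seq_lst)): lst.append(seq_lst[i])
  let lst := (PySem.List.pyRange 0 (PySem.List.len seq_lst)).foldl
    (fun l i => l ++ [PySem.List.pyGetD seq_lst i ""]) []
  -- for i in range(len(lst)-1): … nested j-loop mutating lst in place (indices always in range)
  let lst := (PySem.List.pyRange 0 (PySem.List.len lst - 1)).foldl
    (fun l i =>
      let seq1 := PySem.List.pyGetD l i ""
      (PySem.List.pyRange (i + 1) (PySem.List.len l)).foldl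
        (fun l2 j =>
          let seq2 := PySem.List.pyGetD l2 j ""
          if PySem.Str.isIn seq2 seq1 then PySem.List.pySetD l2 j ""
          else if PySem.Str.isIn seq1 seq2 then PySem.List.pySetD l2 i ""
          else l2) l) lst
  remove_values_from_list lst ""

-- ===== PORT B =====
def merge_seq_alt (seq_lst : List String) : List String :=
  (seq_lst.foldl
    (fun (st : PySem.Set String × List String) s =>
      if PySem.Set.contains st.1 s then st
      else if seq_lst.any (fun t => decide (PySem.Str.len s < PySem.Str.len t) && PySem.Str.isIn s t) then st
      else (PySem.Set.add st.1 s, st.2 ++ [s]))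
    (PySem.Set.empty, [])).2

-- ===== PRECONDITION & SPEC =====
-- On nonempty lists whose elements are all empty strings, A returns an empty result (its deletion
-- sentinel, the empty string, conflates genuine empty sequences with deleted slots and the final
-- filter drops them), while B returns a one-element result holding the empty string, keeping the
-- first duplicate as intended.
def D_merge_seq (seq_lst : List String) : Prop := seq_lst ≠ [] ∧ ∀ s ∈ seq_lst, s = ""
instance (seq_lst : List String) : Decidable (D_merge_seq seq_lst) := by unfold D_merge_seq; infer_instance

def Spec_merge_seq (seq_lst : List String) (out : List String) : Prop :=
  ¬ D_merge_seq seq_lst → out = merge_seq_alt seq_lst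
instance (seq_lst : List String) (out : List String) : Decidable (Spec_merge_seq seq_lst out) := by
  unfold Spec_merge_seq; infer_instance

def pvDiffWitness_merge_seq : List String := [""]
def pvDiffWitnessOut_merge_seq : (List String) × (List String) := ([], [""])

-- ===== CLAIM (what is proved, stated in full; the proofs are below) =====
def Claim_unchanged_merge_seq : Prop :=
  ∀ (seq_lst : List String), Dom_merge_seq seq_lst → Spec_merge_seq seq_lst (merge_seq seq_lst)
def Claim_changed_merge_seq : Prop :=
  Dom_merge_seq (pvDiffWitness_merge_seq) ∧ D_merge_seq (pvDiffWitness_merge_seq) ∧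
  merge_seq (pvDiffWitness_merge_seq) = pvDiffWitnessOut_merge_seq.1 ∧
  merge_seq_alt (pvDiffWitness_merge_seq) = pvDiffWitnessOut_merge_seq.2 ∧
  pvDiffWitnessOut_merge_seq.1 ≠ pvDiffWitnessOut_merge_seq.2
def Claim_exact_merge_seq : Prop :=
  ∀ (seq_lst : List String), Dom_merge_seq seq_lst → D_merge_seq seq_lst →
    merge_seq seq_lst ≠ merge_seq_alt seq_lst

-- ===== LEMMAS AND PROOFS =====

-- ---------- model of A's in-place double loop ----------
-- original value at index k (A's loops never change the length, only overwrite slots with "")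
def pvO (ol : List String) (k : Nat) : String := ol.getD k ""

-- Python's substring relation 'a in b', as a Prop
def pvSub (a b : String) : Prop := a.toList <:+: b.toList

-- the elif-condition of A's inner loop at pair (i, j), over the values v at the start of outer iteration i
def pvCond (v : Nat → String) (i j : Nat) : Bool :=
  decide (i < j) && !(PySem.Str.isIn (v j) (v i)) && PySem.Str.isIn (v i) (v j)

-- slot values after outer iteration i has processed inner indices i+1 ≤ j < m
def pvMid (i m : Nat) (v : Nat → String) : Nat → String := fun k =>
  if k = i then (if (List.range m).any (pvCond v i) then "" else v i)
  else if i < k ∧ k < m then (if PySem.Str.isIn (v k) (v i) then "" else v k)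
  else v k

-- slot values at the start of outer iteration i
def pvV (ol : List String) : Nat → Nat → String
  | 0 => fun k => ol.getD k ""
  | (i+1) => pvMid i ol.length (pvV ol i)

-- "some earlier element contains it" / "some strictly longer element contains it"
def pvE (ol : List String) (k : Nat) : Prop := ∃ i' < k, pvSub (pvO ol k) (pvO ol i')
def pvP (ol : List String) (k : Nat) : Prop :=
  ∃ j < ol.length, pvSub (pvO ol k) (pvO ol j) ∧ (pvO ol k).toList.length < (pvO ol j).toList.length

-- ---------- substring facts ----------
lemma pvSub_isIn (a b : String) : PySem.Str.isIn a b = true ↔ pvSub a b :=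
  PySem.Str.isIn_iff_infix a b
lemma pvSub_empty (b : String) : pvSub "" b := by simp [pvSub]
lemma pvIsIn_empty (b : String) : PySem.Str.isIn "" b = true :=
  (pvSub_isIn _ _).mpr (pvSub_empty b)
lemma pvSub_empty_eq {a : String} (h : pvSub a "") : a = "" := by
  have : a.toList = [] := List.infix_nil.mp (by simpa [pvSub] using h)
  simpa using this
lemma pvSub_trans {a b c : String} (h1 : pvSub a b) (h2 : pvSub b c) : pvSub a c :=
  List.IsInfix.trans h1 h2
lemma pvSub_len {a b : String} (h : pvSub a b) : a.toList.length ≤ b.toList.length := h.length_le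
lemma pvSub_eq_of_len {a b : String} (h : pvSub a b) (hl : b.toList.length ≤ a.toList.length) :
    a = b :=
  String.toList_inj.mp (h.sublist.eq_of_length (Nat.le_antisymm h.length_le hl))
lemma pvIsIn_false {a b : String} : PySem.Str.isIn a b = false ↔ ¬ pvSub a b := by
  rw [Bool.eq_false_iff, Ne, pvSub_isIn]
lemma pvLen_eq (s : String) : PySem.Str.len s = (s.toList.length : Int) := by simp
lemma pvLen_pos_of_ne {s : String} (h : s ≠ "") : 0 < s.toList.length := by
  cases hs : s.toList with
  | nil => exact absurd (by simpa using hs) h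
  | cons c cs => simp

-- ---------- basic list-state lemmas ----------
lemma pvMapO (ol : List String) : (List.range ol.length).map (fun k => ol.getD k "") = ol := by
  apply List.ext_getElem (by simp)
  intro k h1 h2
  simp [List.getD_eq_getElem?_getD, List.getElem?_eq_getElem h2]

lemma pvSetMap (n m : Nat) (f : Nat → String) (x : String) :
    ((List.range n).map f).set m x = (List.range n).map (fun k => if k = m then x else f k) := by
  apply List.ext_getElem (by simp)
  intro k h1 h2
  simp only [List.getElem_set, List.getElem_map, List.getElem_range]
  rcases eq_or_ne m k with h | h
  · rw [if_pos h, if_pos h.symm]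
  · rw [if_neg h, if_neg (fun hh => h hh.symm)]

lemma pvMid_ne (i m : Nat) (v : Nat → String) (k : Nat) (h1 : k ≠ i) (h2 : ¬ (i < k ∧ k < m)) :
    pvMid i m v k = v k := by
  unfold pvMid; rw [if_neg h1, if_neg h2]

lemma pvMid_mid (i m : Nat) (v : Nat → String) (k : Nat) (h1 : k ≠ i) (h2 : i < k ∧ k < m) :
    pvMid i m v k = (if PySem.Str.isIn (v k) (v i) then "" else v k) := by
  unfold pvMid; rw [if_neg h1, if_pos h2]

lemma pvMid_self (i m : Nat) (v : Nat → String) :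
    pvMid i m v i = (if (List.range m).any (pvCond v i) then "" else v i) := by
  unfold pvMid; rw [if_pos rfl]

lemma pvMid_start (i : Nat) (v : Nat → String) (k : Nat) : pvMid i (i+1) v k = v k := by
  rcases eq_or_ne k i with h | h
  · subst h
    rw [pvMid_self]
    have hany : (List.range (k+1)).any (pvCond v k) = false := by
      apply List.any_eq_false.mpr
      intro j hj
      rw [List.mem_range] at hj
      unfold pvCond
      have : decide (k < j) = false := by simp; omega
      rw [this, Bool.false_and, Bool.false_and]; exact Bool.false_ne_true
    rw [hany]; simp
  · exact pvMid_ne _ _ _ _ h (by omega)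

lemma pvV_succ (ol : List String) (i : Nat) : pvV ol (i+1) = pvMid i ol.length (pvV ol i) := rfl

lemma pvInv1 (ol : List String) : ∀ i k, pvV ol i k = ol.getD k "" ∨ pvV ol i k = "" := by
  intro i
  induction i with
  | zero => intro k; left; rfl
  | succ i ih =>
    intro k
    rw [pvV_succ]
    rcases eq_or_ne k i with h1 | h1
    · subst h1
      rw [pvMid_self]
      split_ifs with h
      · right; rfl
      · exact ih k
    · by_cases h2 : i < k ∧ k < ol.length
      · rw [pvMid_mid _ _ _ _ h1 h2]
        split_ifs with h
        · right; rfl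
        · exact ih k
      · rw [pvMid_ne _ _ _ _ h1 h2]; exact ih k

lemma pvV_ge (ol : List String) {k : Nat} (hk : ol.length ≤ k) : ∀ i, pvV ol i k = "" := by
  intro i
  induction i with
  | zero => exact List.getD_eq_default _ _ hk
  | succ i ih =>
    rw [pvV_succ]
    rcases eq_or_ne k i with h1 | h1
    · subst h1
      rw [pvMid_self]
      split_ifs with h
      · rfl
      · exact ih
    · rw [pvMid_ne _ _ _ _ h1 (by omega)]; exact ih

-- ---------- value characterization of the loop ----------
lemma pvL1 (ol : List String) :
    ∀ i k, i ≤ k →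
      (pvV ol i k = "" ↔ (pvO ol k = "" ∨ ∃ i' < i, pvSub (pvO ol k) (pvO ol i'))) := by
  intro i
  induction i with
  | zero =>
    intro k _
    constructor
    · intro h; exact Or.inl h
    · rintro (h | ⟨i', hi', -⟩)
      · exact h
      · omega
  | succ i ih =>
    intro k hik
    have hik' : i < k := hik
    have hne : k ≠ i := by omega
    have hback : ∀ _ : (pvO ol k = "" ∨ ∃ i' < i, pvSub (pvO ol k) (pvO ol i')),
        pvV ol i k = "" := fun h => (ih k (by omega)).mpr h
    rw [pvV_succ]
    by_cases hkn : k < ol.length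
    case neg =>
      have hv : pvMid i ol.length (pvV ol i) k = "" := by
        rw [pvMid_ne _ _ _ _ hne (by omega)]
        exact pvV_ge ol (by omega) i
      have ho : pvO ol k = "" := List.getD_eq_default _ _ (by omega)
      simp [hv, ho]
    case pos =>
      rw [pvMid_mid _ _ _ _ hne ⟨hik', hkn⟩]
      constructor
      · intro h
        split_ifs at h with hin
        · rcases pvInv1 ol i k with hvk | hvk
          · rcases pvInv1 ol i i with hvi | hvi
            · right
              exact ⟨i, by omega, (pvSub_isIn _ _).mp (by unfold pvO; rw [← hvk, ← hvi]; exact hin)⟩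
            · rw [hvi] at hin
              left
              unfold pvO; rw [← hvk]
              exact pvSub_empty_eq ((pvSub_isIn _ _).mp hin)
          · rcases (ih k (by omega)).mp hvk with h' | ⟨i', hi', hs⟩
            · exact Or.inl h'
            · exact Or.inr ⟨i', by omega, hs⟩
        · rcases (ih k (by omega)).mp h with h' | ⟨i', hi', hs⟩
          · exact Or.inl h'
          · exact Or.inr ⟨i', by omega, hs⟩
      · rintro (ho | ⟨i', hi', hs⟩)
        · have hvk : pvV ol i k = "" := hback (Or.inl ho)
          split_ifs with hin
          · rfl
          · exact hvk
        · rcases Nat.lt_succ_iff_lt_or_eq.mp hi' with hlt | heq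
          · have hvk : pvV ol i k = "" := hback (Or.inr ⟨i', hlt, hs⟩)
            split_ifs with hin
            · rfl
            · exact hvk
          · rw [heq] at hs
            rcases pvInv1 ol i i with hvi | hvi
            · have hin : PySem.Str.isIn (pvV ol i k) (pvV ol i i) = true := by
                rcases pvInv1 ol i k with hvk | hvk
                · rw [hvk, hvi]; exact (pvSub_isIn _ _).mpr hs
                · rw [hvk]; exact pvIsIn_empty _
              rw [if_pos hin]
            · rcases (ih i le_rfl).mp hvi with ho' | ⟨i'', hi'', hs'⟩
              · have hvk : pvV ol i k = "" := hback (Or.inl (pvSub_empty_eq (ho' ▸ hs)))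
                split_ifs with hin
                · rfl
                · exact hvk
              · have hvk : pvV ol i k = "" :=
                  hback (Or.inr ⟨i'', hi'', pvSub_trans hs hs'⟩)
                split_ifs with hin
                · rfl
                · exact hvk

lemma pvFrozen (ol : List String) (k : Nat) : ∀ i, k + 1 ≤ i → pvV ol i k = pvV ol (k+1) k := by
  intro i
  induction i with
  | zero => omega
  | succ i ih =>
    intro h
    rcases eq_or_lt_of_le h with h' | h'
    · rw [← h']
    · have hki : k + 1 ≤ i := by omega
      rw [pvV_succ, pvMid_ne _ _ _ _ (by omega) (by omega)]
      exact ih hki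

lemma pvL2 (ol : List String) (k : Nat) (hk : k < ol.length) :
    (pvV ol (ol.length - 1) k = "" ↔ (pvO ol k = "" ∨ pvE ol k ∨ pvP ol k)) := by
  have hvkk := pvL1 ol k k le_rfl
  rcases eq_or_lt_of_le (Nat.le_sub_one_of_lt hk) with hlast | hmid
  · rw [← hlast]
    rw [pvL1 ol k k le_rfl]
    constructor
    · rintro (h | h)
      · exact Or.inl h
      · exact Or.inr (Or.inl h)
    · rintro (h | h | ⟨j, hj, hs, hlen⟩)
      · exact Or.inl h
      · exact Or.inr h
      · right
        have hjk : j ≠ k := by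
          intro he; rw [he] at hlen; omega
        exact ⟨j, by omega, hs⟩
  · rw [pvFrozen ol k (ol.length - 1) (by omega), pvV_succ, pvMid_self]
    constructor
    · intro h
      split_ifs at h with hany
      · obtain ⟨j, hjmem, hc⟩ := List.any_eq_true.mp hany
        rw [List.mem_range] at hjmem
        unfold pvCond at hc
        rw [Bool.and_eq_true, Bool.and_eq_true] at hc
        obtain ⟨⟨hkj, hnin⟩, hin⟩ := hc
        rw [decide_eq_true_eq] at hkj
        rw [Bool.not_eq_eq_eq_not, Bool.not_true, pvIsIn_false] at hnin
        rcases pvInv1 ol k k with hvk | hvk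
        · rcases pvInv1 ol k j with hvj | hvj
          · rw [hvk, hvj] at hin hnin
            have hs := (pvSub_isIn _ _).mp hin
            right; right
            refine ⟨j, hjmem, hs, ?_⟩
            rcases Nat.lt_or_ge (pvO ol k).toList.length (pvO ol j).toList.length with h' | h'
            · exact h'
            · exact absurd (pvSub_eq_of_len hs h' ▸ List.infix_refl _) hnin
          · rw [hvj] at hnin
            exact absurd (pvSub_empty _) hnin
        · rcases hvkk.mp hvk with h' | h'
          · exact Or.inl h'
          · exact Or.inr (Or.inl h')
      · rcases hvkk.mp h with h' | h'
        · exact Or.inl h'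
        · exact Or.inr (Or.inl h')
    · intro h
      rcases (em (pvO ol k = "" ∨ pvE ol k)) with hfirst | hnfirst
      · have hvk : pvV ol k k = "" := hvkk.mpr (by tauto)
        split_ifs with hany
        · rfl
        · exact hvk
      · rcases h with h | h | hP
        · exact absurd (Or.inl h) hnfirst
        · exact absurd (Or.inr h) hnfirst
        · rw [not_or] at hnfirst
          obtain ⟨ho, hE⟩ := hnfirst
          obtain ⟨j, hjn, hs, hlen⟩ := hP
          have hkj : k < j := by
            rcases Nat.lt_trichotomy j k with h' | h' | h'
            · exact absurd ⟨j, h', hs⟩ hE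
            · exfalso; rw [h'] at hlen; omega
            · exact h'
          have hvk : pvV ol k k = pvO ol k := by
            rcases pvInv1 ol k k with h' | h'
            · exact h'
            · exfalso
              rcases hvkk.mp h' with h'' | h''
              · exact ho h''
              · exact hE h''
          have hoj : pvO ol j ≠ "" := by
            intro he; rw [he] at hlen; simp at hlen
          have hvj : pvV ol k j = pvO ol j := by
            rcases pvInv1 ol k j with h' | h'
            · exact h'
            · exfalso
              rcases (pvL1 ol k j (by omega)).mp h' with h'' | ⟨i', hi', hs'⟩
              · exact hoj h''
              · exact hE ⟨i', hi', pvSub_trans hs hs'⟩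
          have hcond : pvCond (pvV ol k) k j = true := by
            unfold pvCond
            rw [Bool.and_eq_true, Bool.and_eq_true]
            refine ⟨⟨decide_eq_true hkj, ?_⟩, ?_⟩
            · rw [Bool.not_eq_eq_eq_not, Bool.not_true, pvIsIn_false, hvj, hvk]
              intro hsub
              exact absurd (pvSub_len hsub) (by omega)
            · rw [hvj, hvk]
              exact (pvSub_isIn _ _).mpr hs
          have hany : (List.range ol.length).any (pvCond (pvV ol k) k) = true :=
            List.any_eq_true.mpr ⟨j, List.mem_range.mpr hjn, hcond⟩
          rw [if_pos hany]

-- ---------- the fold of port A computes the model ----------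
lemma pvAny_succ (m : Nat) (p : Nat → Bool) :
    (List.range (m+1)).any p = ((List.range m).any p || p m) := by
  rw [List.range_succ, List.any_append]; simp

lemma pvCond_eval (v : Nat → String) (i m : Nat) (him : i < m) :
    pvCond v i m
      = ((!(PySem.Str.isIn (v m) (v i))) && PySem.Str.isIn (v i) (v m)) := by
  unfold pvCond
  rw [decide_eq_true him, Bool.true_and]

lemma pvStep1 (v : Nat → String) (i m : Nat) (him : i < m)
    (h1 : PySem.Str.isIn (v m) (v i) = true) (k : Nat) :
    (if k = m then "" else pvMid i m v k) = pvMid i (m+1) v k := by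
  rcases eq_or_ne k m with hkm | hkm
  · subst hkm
    rw [if_pos rfl, pvMid_mid i (k+1) v k (by omega) (by omega), if_pos h1]
  · rw [if_neg hkm]
    rcases eq_or_ne k i with hki | hki
    · subst hki
      rw [pvMid_self, pvMid_self, pvAny_succ, pvCond_eval v k m him, h1]
      simp
    · by_cases hb : i < k ∧ k < m
      · rw [pvMid_mid i m v k hki hb, pvMid_mid i (m+1) v k hki (by omega)]
      · rw [pvMid_ne i m v k hki hb, pvMid_ne i (m+1) v k hki (by omega)]

lemma pvStep2 (v : Nat → String) (i m : Nat) (him : i < m)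
    (h1 : PySem.Str.isIn (v m) (v i) = false) (h2 : PySem.Str.isIn (v i) (v m) = true) (k : Nat) :
    (if k = i then "" else pvMid i m v k) = pvMid i (m+1) v k := by
  rcases eq_or_ne k i with hki | hki
  · subst hki
    rw [if_pos rfl, pvMid_self, pvAny_succ, pvCond_eval v k m him, h1, h2]
    simp
  · rw [if_neg hki]
    rcases eq_or_ne k m with hkm | hkm
    · subst hkm
      rw [pvMid_ne i k v k hki (by omega), pvMid_mid i (k+1) v k hki (by omega),
        if_neg (by rw [h1]; exact Bool.false_ne_true)]
    · by_cases hb : i < k ∧ k < m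
      · rw [pvMid_mid i m v k hki hb, pvMid_mid i (m+1) v k hki (by omega)]
      · rw [pvMid_ne i m v k hki hb, pvMid_ne i (m+1) v k hki (by omega)]

lemma pvStep3 (v : Nat → String) (i m : Nat) (him : i < m)
    (h1 : PySem.Str.isIn (v m) (v i) = false) (h2 : PySem.Str.isIn (v i) (v m) = false) (k : Nat) :
    pvMid i m v k = pvMid i (m+1) v k := by
  rcases eq_or_ne k i with hki | hki
  · subst hki
    rw [pvMid_self, pvMid_self, pvAny_succ, pvCond_eval v k m him, h2]
    simp
  · rcases eq_or_ne k m with hkm | hkm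
    · subst hkm
      rw [pvMid_ne i k v k hki (by omega), pvMid_mid i (k+1) v k hki (by omega),
        if_neg (by rw [h1]; exact Bool.false_ne_true)]
    · by_cases hb : i < k ∧ k < m
      · rw [pvMid_mid i m v k hki hb, pvMid_mid i (m+1) v k hki (by omega)]
      · rw [pvMid_ne i m v k hki hb, pvMid_ne i (m+1) v k hki (by omega)]

lemma pvInner (n : Nat) (v : Nat → String) (i : Nat) (hi : i < n) :
    ∀ (d m : Nat), i < m → m ≤ n → n - m = d →
    (PySem.List.pyRange (m : Int) (n : Int)).foldl
      (fun l2 j =>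
        let seq2 := PySem.List.pyGetD l2 j ""
        if PySem.Str.isIn seq2 (v i) then PySem.List.pySetD l2 j ""
        else if PySem.Str.isIn (v i) seq2 then PySem.List.pySetD l2 (↑i) ""
        else l2)
      ((List.range n).map (pvMid i m v))
    = (List.range n).map (pvMid i n v) := by
  intro d
  induction d with
  | zero =>
    intro m him hmn hd
    have hmn' : m = n := by omega
    subst hmn'
    rw [PySem.List.pyRange_one_eq_nil (le_refl _)]
    rfl
  | succ d ih =>
    intro m him hmn hd
    have hmn' : m < n := by omega
    rw [PySem.List.pyRange_one_cons (by exact_mod_cast hmn'), List.foldl_cons]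
    have hget : PySem.List.pyGetD ((List.range n).map (pvMid i m v)) ((m : Nat) : Int) "" = v m := by
      rw [PySem.List.pyGetD_natCast, PySem.List.getD_map_range _ _ _ _ hmn']
      exact pvMid_ne i m v m (by omega) (by omega)
    have hcast : ((m : Int) + 1) = ((m + 1 : Nat) : Int) := by push_cast; ring
    dsimp only
    rw [hget]
    by_cases h1 : PySem.Str.isIn (v m) (v i) = true
    · rw [if_pos h1, PySem.List.pySetD_natCast,
        pvSetMap n m (pvMid i m v) "",
        List.map_congr_left (fun k _ => pvStep1 v i m him h1 k), hcast]
      exact ih (m+1) (by omega) (by omega) (by omega)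
    · rw [if_neg h1]
      rw [Bool.not_eq_true] at h1
      by_cases h2 : PySem.Str.isIn (v i) (v m) = true
      · rw [if_pos h2, PySem.List.pySetD_natCast,
          pvSetMap n i (pvMid i m v) "",
          List.map_congr_left (fun k _ => pvStep2 v i m him h1 h2 k), hcast]
        exact ih (m+1) (by omega) (by omega) (by omega)
      · rw [if_neg h2]
        rw [Bool.not_eq_true] at h2
        rw [List.map_congr_left (fun k _ => pvStep3 v i m him h1 h2 k), hcast]
        exact ih (m+1) (by omega) (by omega) (by omega)

lemma pvOuter (ol : List String) (hn : 1 ≤ ol.length) :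
    ∀ (d c : Nat), c ≤ ol.length - 1 → (ol.length - 1) - c = d →
    (PySem.List.pyRange (c : Int) ((ol.length : Int) - 1)).foldl
      (fun l i =>
        let seq1 := PySem.List.pyGetD l i ""
        (PySem.List.pyRange (i + 1) (PySem.List.len l)).foldl
          (fun l2 j =>
            let seq2 := PySem.List.pyGetD l2 j ""
            if PySem.Str.isIn seq2 seq1 then PySem.List.pySetD l2 j ""
            else if PySem.Str.isIn seq1 seq2 then PySem.List.pySetD l2 i ""
            else l2) l)
      ((List.range ol.length).map (pvV ol c))
    = (List.range ol.length).map (pvV ol (ol.length - 1)) := by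
  intro d
  induction d with
  | zero =>
    intro c h1 h2
    have hc : c = ol.length - 1 := by omega
    subst hc
    rw [PySem.List.pyRange_one_eq_nil (by omega)]
    rfl
  | succ d ih =>
    intro c h1 h2
    have hc : c < ol.length - 1 := by omega
    rw [PySem.List.pyRange_one_cons (by omega), List.foldl_cons]
    dsimp only
    have hget : PySem.List.pyGetD ((List.range ol.length).map (pvV ol c)) ((c : Nat) : Int) ""
        = pvV ol c c := by
      rw [PySem.List.pyGetD_natCast, PySem.List.getD_map_range _ _ _ _ (by omega)]
    rw [hget]
    have hlen : PySem.List.len ((List.range ol.length).map (pvV ol c)) = (ol.length : Int) := by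
      rw [PySem.List.len_eq]; simp
    rw [hlen]
    rw [List.map_congr_left (fun k (_ : k ∈ List.range ol.length) =>
      (pvMid_start c (pvV ol c) k).symm)]
    have hcast : ((c : Int) + 1) = ((c + 1 : Nat) : Int) := by push_cast; ring
    rw [hcast]
    rw [pvInner ol.length (pvV ol c) c (by omega) (ol.length - (c+1)) (c+1) (by omega) (by omega) rfl]
    rw [← pvV_succ]
    exact ih (c+1) (by omega) (by omega)

lemma pvA_eq (ol : List String) :
    merge_seq ol
      = ((List.range ol.length).map (pvV ol (ol.length - 1))).filter (fun s => s != "") := by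
  unfold merge_seq remove_values_from_list
  dsimp only
  rw [PySem.List.foldl_append_singleton_eq_map (fun i => PySem.List.pyGetD ol i ""),
    List.nil_append, PySem.List.map_pyGetD_pyRange_zero]
  rcases Nat.eq_zero_or_pos ol.length with h0 | h1
  · have : ol = [] := List.length_eq_zero_iff.mp h0
    subst this
    rw [PySem.List.pyRange_one_eq_nil (by simp)]
    rfl
  · have hstart : ol = (List.range ol.length).map (pvV ol 0) := by
      rw [show (List.range ol.length).map (pvV ol 0)
          = (List.range ol.length).map (fun k => ol.getD k "") from rfl, pvMapO]
    conv_lhs => rw [hstart]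
    have hlen : PySem.List.len ((List.range ol.length).map (pvV ol 0)) = (ol.length : Int) := by
      rw [PySem.List.len_eq]; simp
    rw [hlen]
    rw [show (0 : Int) = ((0 : Nat) : Int) from rfl]
    rw [pvOuter ol h1 (ol.length - 1) 0 (by omega) (by omega)]

-- ---------- the fold of port B ----------
def pvGood (ol : List String) (s : String) : Bool :=
  !(ol.any (fun t => decide (PySem.Str.len s < PySem.Str.len t) && PySem.Str.isIn s t))

lemma pvBpair (ol : List String) :
    ∀ (l : List String) (S : List String),
    (l.foldl
      (fun (st : PySem.Set String × List String) s =>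
        if PySem.Set.contains st.1 s then st
        else if ol.any (fun t => decide (PySem.Str.len s < PySem.Str.len t) && PySem.Str.isIn s t) then st
        else (PySem.Set.add st.1 s, st.2 ++ [s]))
      (S, S)).2
    = l.foldl (fun S s => if pvGood ol s then PySem.Set.add S s else S) S := by
  intro l
  induction l with
  | nil => intro S; rfl
  | cons s l ih =>
    intro S
    rw [List.foldl_cons, List.foldl_cons]
    dsimp only
    by_cases hc : PySem.Set.contains S s = true
    · rw [if_pos hc]
      have hstep : (if pvGood ol s then PySem.Set.add S s else S) = S := by
        split_ifs with h
        · show (if PySem.Set.contains S s = true then S else S ++ [s]) = S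
          rw [if_pos hc]
        · rfl
      rw [hstep]
      exact ih S
    · rw [if_neg hc]
      by_cases hb : ol.any (fun t => decide (PySem.Str.len s < PySem.Str.len t) && PySem.Str.isIn s t) = true
      · rw [if_pos hb]
        have hg : pvGood ol s = false := by unfold pvGood; rw [hb]; rfl
        rw [hg]
        simp only [Bool.false_eq_true, if_false]
        exact ih S
      · rw [if_neg hb]
        have hg : pvGood ol s = true := by
          unfold pvGood; rw [Bool.eq_false_iff.mpr hb]; rfl
        rw [hg]
        simp only [if_true]
        have hadd : PySem.Set.add S s = S ++ [s] := by
          show (if PySem.Set.contains S s = true then S else S ++ [s]) = S ++ [s]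
          rw [if_neg hc]
        rw [hadd]
        exact ih (S ++ [s])

lemma pvB_eq (ol : List String) :
    merge_seq_alt ol = PySem.Set.ofList (ol.filter (pvGood ol)) := by
  unfold merge_seq_alt
  rw [show ((PySem.Set.empty : PySem.Set String), ([] : List String))
      = (([] : List String), ([] : List String)) from rfl]
  rw [pvBpair ol ol []]
  rw [PySem.List.foldl_if_eq_foldl_filter (pvGood ol) PySem.Set.add ol []]
  rw [← PySem.Set.ofList_eq_foldl]

-- ---------- relating the two characterizations ----------
lemma pvMem_iff (ol : List String) (t : String) : t ∈ ol ↔ ∃ j < ol.length, pvO ol j = t := by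
  constructor
  · intro h
    obtain ⟨j, hj, he⟩ := List.mem_iff_getElem.mp h
    exact ⟨j, hj, by unfold pvO; rw [List.getD_eq_getElem ol "" hj]; exact he⟩
  · rintro ⟨j, hj, he⟩
    rw [← he]
    unfold pvO; rw [List.getD_eq_getElem ol "" hj]
    exact List.getElem_mem hj

lemma pvGood_false_iff (ol : List String) (k : Nat) :
    pvGood ol (pvO ol k) = false ↔ pvP ol k := by
  unfold pvGood
  have hnot : ∀ b : Bool, ((!b) = false) ↔ (b = true) := by decide
  rw [hnot, List.any_eq_true]
  constructor
  · rintro ⟨t, ht, hcond⟩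
    rw [Bool.and_eq_true, decide_eq_true_eq] at hcond
    obtain ⟨hlt, hin⟩ := hcond
    obtain ⟨j, hj, he⟩ := (pvMem_iff ol t).mp ht
    rw [pvLen_eq, pvLen_eq] at hlt
    refine ⟨j, hj, ?_, ?_⟩
    · rw [he]; exact (pvSub_isIn _ _).mp hin
    · rw [he]; exact_mod_cast hlt
  · rintro ⟨j, hj, hs, hlen⟩
    refine ⟨pvO ol j, (pvMem_iff ol _).mpr ⟨j, hj, rfl⟩, ?_⟩
    rw [Bool.and_eq_true, decide_eq_true_eq]
    refine ⟨?_, (pvSub_isIn _ _).mpr hs⟩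
    rw [pvLen_eq, pvLen_eq]
    exact_mod_cast hlen

lemma pvOfListAppend (xs : List String) (x : String) :
    PySem.Set.ofList (xs ++ [x]) = PySem.Set.add (PySem.Set.ofList xs) x := by
  rw [PySem.Set.ofList_eq_foldl, PySem.Set.ofList_eq_foldl, List.foldl_append]
  rfl

lemma pvOfList_map_range (o : Nat → String) (g : Nat → Bool)
    (hg : ∀ k k', o k = o k' → g k = g k') :
    ∀ n, PySem.Set.ofList (((List.range n).filter g).map o)
      = ((List.range n).filter (fun k => g k && decide (∀ k' < k, o k' ≠ o k))).map o := by
  intro n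
  induction n with
  | zero => rfl
  | succ n ih =>
    rw [List.range_succ, List.filter_append, List.map_append, List.filter_append, List.map_append]
    by_cases hgn : g n = true
    · have hfl : List.filter g [n] = [n] := by simp [hgn]
      rw [hfl, show List.map o [n] = [o n] from rfl, pvOfListAppend, ih]
      by_cases hex : ∃ k, k < n ∧ o k = o n
      · have hcontains : PySem.Set.contains
            (((List.range n).filter (fun k => g k && decide (∀ k' < k, o k' ≠ o k))).map o)
            (o n) = true := by
          apply (PySem.Set.contains_iff _ _).mpr
          have hk0 := Nat.find_spec hex
          apply List.mem_map.mpr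
          refine ⟨Nat.find hex, ?_, hk0.2⟩
          apply List.mem_filter.mpr
          refine ⟨List.mem_range.mpr hk0.1, ?_⟩
          rw [Bool.and_eq_true, decide_eq_true_eq]
          constructor
          · rw [hg _ _ hk0.2]; exact hgn
          · intro k' hk' heq
            exact Nat.find_min hex hk' ⟨by omega, by rw [heq]; exact hk0.2⟩
        have hadd : PySem.Set.add
            (((List.range n).filter (fun k => g k && decide (∀ k' < k, o k' ≠ o k))).map o) (o n)
            = ((List.range n).filter (fun k => g k && decide (∀ k' < k, o k' ≠ o k))).map o := by
          show (if PySem.Set.contains _ (o n) = true then _ else _ ++ [o n]) = _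
          rw [if_pos hcontains]
        have hqn : (g n && decide (∀ k' < n, o k' ≠ o n)) = false := by
          obtain ⟨k, hk, hke⟩ := hex
          have : decide (∀ k' < n, o k' ≠ o n) = false := by
            rw [decide_eq_false_iff_not]
            intro hall
            exact hall k hk hke
          rw [this, Bool.and_false]
        rw [hadd,
          show List.filter (fun k => g k && decide (∀ k' < k, o k' ≠ o k)) [n] = [] from by
            simp [hqn],
          List.map_nil, List.append_nil]
      · have hncont : PySem.Set.contains
            (((List.range n).filter (fun k => g k && decide (∀ k' < k, o k' ≠ o k))).map o)
            (o n) = false := by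
          rw [Bool.eq_false_iff, Ne]
          intro hmem
          obtain ⟨k, hkf, hke⟩ := List.mem_map.mp ((PySem.Set.contains_iff _ _).mp hmem)
          exact hex ⟨k, List.mem_range.mp (List.mem_filter.mp hkf).1, hke⟩
        have hadd : PySem.Set.add
            (((List.range n).filter (fun k => g k && decide (∀ k' < k, o k' ≠ o k))).map o) (o n)
            = ((List.range n).filter (fun k => g k && decide (∀ k' < k, o k' ≠ o k))).map o
              ++ [o n] := by
          show (if PySem.Set.contains _ (o n) = true then _ else _ ++ [o n]) = _ ++ [o n]
          rw [if_neg (by rw [hncont]; exact Bool.false_ne_true)]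
        have hqn : (g n && decide (∀ k' < n, o k' ≠ o n)) = true := by
          rw [Bool.and_eq_true, decide_eq_true_eq]
          refine ⟨hgn, fun k' hk' heq => hex ⟨k', hk', heq⟩⟩
        rw [hadd,
          show List.filter (fun k => g k && decide (∀ k' < k, o k' ≠ o k)) [n] = [n] from by
            simp [hqn]]
        rfl
    · have hgn' : g n = false := Bool.eq_false_iff.mpr hgn
      have hqn : (g n && decide (∀ k' < n, o k' ≠ o n)) = false := by
        rw [hgn', Bool.false_and]
      rw [show List.filter g [n] = [] from by simp [hgn'],
        show List.filter (fun k => g k && decide (∀ k' < k, o k' ≠ o k)) [n] = [] from by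
          simp [hqn]]
      simp only [List.map_nil, List.append_nil]
      exact ih

lemma pvFilterIdx (p : String → Bool) (l : List String) :
    l.filter p
      = ((List.range l.length).filter (p ∘ (fun k => l.getD k ""))).map (fun k => l.getD k "") := by
  conv_lhs => rw [← pvMapO l]
  rw [List.filter_map]

lemma pvNonempty (ol : List String) (hD : ¬ D_merge_seq ol) (hne : ol ≠ []) :
    ∃ t ∈ ol, t ≠ "" := by
  unfold D_merge_seq at hD
  rw [not_and_or] at hD
  rcases hD with h | h
  · exact absurd hne (by simpa using h)
  · simpa using h

lemma pvPointwise (ol : List String) (hD : ¬ D_merge_seq ol) :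
    ∀ k ∈ List.range ol.length,
      ((fun s => s != "") ∘ (pvV ol (ol.length - 1))) k
        = (((pvGood ol) ∘ (pvO ol)) k && decide (∀ k' < k, pvO ol k' ≠ pvO ol k)) := by
  intro k hk
  rw [List.mem_range] at hk
  rw [Bool.eq_iff_iff, Function.comp_apply, Function.comp_apply, bne_iff_ne, Ne,
    Bool.and_eq_true, decide_eq_true_eq]
  rw [pvL2 ol k hk]
  by_cases hgb : pvGood ol (pvO ol k) = true
  · have hnp : ¬ pvP ol k := by
      intro hp
      rw [(pvGood_false_iff ol k).mpr hp] at hgb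
      exact Bool.false_ne_true hgb
    constructor
    · intro h
      rw [not_or, not_or] at h
      obtain ⟨h1, h2, h3⟩ := h
      refine ⟨hgb, fun k' hk' heq => ?_⟩
      exact h2 ⟨k', hk', by unfold pvSub; rw [heq]⟩
    · rintro ⟨-, hF⟩
      rw [not_or, not_or]
      refine ⟨?_, ?_, hnp⟩
      · intro ho
        apply hnp
        obtain ⟨t, htmem, htne⟩ := pvNonempty ol hD (by
          intro he; rw [he] at hk; simp at hk)
        obtain ⟨j, hj, hje⟩ := (pvMem_iff ol t).mp htmem
        refine ⟨j, hj, by rw [ho]; exact pvSub_empty _, ?_⟩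
        rw [ho, hje]
        simpa using pvLen_pos_of_ne htne
      · rintro ⟨i', hi', hs⟩
        rcases Nat.lt_or_ge (pvO ol k).toList.length (pvO ol i').toList.length with hl | hl
        · exact hnp ⟨i', by omega, hs, hl⟩
        · exact hF i' hi' (pvSub_eq_of_len hs hl).symm
  · have hp : pvP ol k := (pvGood_false_iff ol k).mp (Bool.eq_false_iff.mpr hgb)
    constructor
    · intro h
      exact absurd (Or.inr (Or.inr hp)) h
    · rintro ⟨hgb', -⟩
      exact absurd hgb' hgb

lemma pvFoldlAdd_noNew : ∀ (t S : List String), (∀ x ∈ t, x ∈ S) → t.foldl PySem.Set.add S = S := by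
  intro t
  induction t with
  | nil => intro S _; rfl
  | cons s t ih =>
    intro S h
    rw [List.foldl_cons]
    have hadd : PySem.Set.add S s = S := by
      show (if PySem.Set.contains S s = true then S else S ++ [s]) = S
      rw [if_pos ((PySem.Set.contains_iff S s).mpr (h s (by simp)))]
    rw [hadd]
    exact ih S (fun x hx => h x (by simp [hx]))

lemma pvOfList_const (ol : List String) (hne : ol ≠ []) (hall : ∀ s ∈ ol, s = "") :
    PySem.Set.ofList ol = [""] := by
  cases ol with
  | nil => exact absurd rfl hne
  | cons s t =>
    have hs : s = "" := hall s (by simp)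
    subst hs
    rw [PySem.Set.ofList_eq_foldl, List.foldl_cons]
    show t.foldl PySem.Set.add [""] = [""]
    exact pvFoldlAdd_noNew t [""] (fun x hx => by
      rw [hall x (by simp [hx])]; simp)

-- ===== VERDICT (by name: the statement is the Claim_ definition above) =====
theorem merge_seq_spec : Claim_unchanged_merge_seq := by
  unfold Claim_unchanged_merge_seq Spec_merge_seq
  intro ol _ hD
  rw [pvA_eq, pvB_eq, List.filter_map]
  have hA2 : ∀ k ∈ (List.range ol.length).filter
      ((fun s => s != "") ∘ (pvV ol (ol.length - 1))),
      pvV ol (ol.length - 1) k = pvO ol k := by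
    intro k hkf
    have h2 := (List.mem_filter.mp hkf).2
    rcases pvInv1 ol (ol.length - 1) k with h | h
    · exact h
    · exfalso
      rw [Function.comp_apply, h] at h2
      simp at h2
  rw [List.map_congr_left hA2]
  rw [pvFilterIdx (pvGood ol) ol]
  rw [show (fun k => ol.getD k "") = pvO ol from rfl]
  rw [pvOfList_map_range (pvO ol) ((pvGood ol) ∘ (pvO ol))
    (fun k k' h => by rw [Function.comp_apply, Function.comp_apply, h]) ol.length]
  exact congrArg _ (List.filter_congr (pvPointwise ol hD))

theorem merge_seq_changed : Claim_changed_merge_seq := by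
  unfold Claim_changed_merge_seq; decide

theorem merge_seq_tight : Claim_exact_merge_seq := by
  unfold Claim_exact_merge_seq
  intro ol _ hD
  obtain ⟨hne, hall⟩ := hD
  have hn : 0 < ol.length := by
    cases ol with
    | nil => exact absurd rfl hne
    | cons s t => simp
  have hA : merge_seq ol = [] := by
    rw [pvA_eq]
    apply List.filter_eq_nil_iff.mpr
    intro x hx
    obtain ⟨k, hkr, he⟩ := List.mem_map.mp hx
    rw [List.mem_range] at hkr
    have ho : pvO ol k = "" := by
      unfold pvO
      rw [List.getD_eq_getElem ol "" hkr]
      exact hall _ (List.getElem_mem hkr)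
    have : pvV ol (ol.length - 1) k = "" := (pvL2 ol k hkr).mpr (Or.inl ho)
    rw [← he, this]
    simp
  have hB : merge_seq_alt ol = [""] := by
    rw [pvB_eq]
    have hfil : ol.filter (pvGood ol) = ol := by
      apply List.filter_eq_self.mpr
      intro s hs
      unfold pvGood
      have hany : ol.any (fun t => decide (PySem.Str.len s < PySem.Str.len t)
          && PySem.Str.isIn s t) = false := by
        apply List.any_eq_false.mpr
        intro t ht
        rw [hall s hs, hall t ht]
        decide
      rw [hany]
      rfl
    rw [hfil]
    exact pvOfList_const ol hne hall
  rw [hA, hB]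
  simp
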